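-- pv_equiv track=rewrite | github.com/Jolan-B/TourDeHano- | jeu.py | solution
-- ===== SOURCE A (Python) =====
-- import copy
--
-- def init(n):
--     liste=[]                    #liste représente l'ensemble des disques empilé (dans l'ordre décroissant) sur la tour la plus à gauche
--     while n>=1:                 #empilement des n disques
--         liste+=[n]
--         n-=1
--     res=[liste,[],[]]           #les tours du milieu et de droite sont forcément vide au début du jeu
--     return res
--
-- def disqueSup(plateau,numtour):
--     config=plateau[numtour]     #prend la configuration de disque(s) à la tour demandé
--     if config!=[]:
--         res=config[-1]          #si il y a un ou plusieurs disque(s), res prend la valeur du disque le plus en haut de la tour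
--     else :
--         res=-1                  #si la tour est vide le programme renvoie -1
--     return res
--
-- def solution(n,tour0=0, tour2=2, tour1=1):
--
--     deplacement=[]
--
--     def solution_deplacement(n,tour0=0, tour2=2, tour1=1):          #ajoute à deplacement toutes les listes des couples des deux tours à jouer(deplacer le disque de la tour a à la tour b)
--         if n == 1:                                                  #par exemple pour n=3 deplacement=[[0, 1], [0, 2], [1, 2]]
--                                                                     #met cette fonction dans l'autre car permet de réunitialiser deplacement et ainsi de pouvoir demander plusieurs solutions dans l'algorythme
--             return deplacement.append([tour0, tour2])
--         solution_deplacement(n-1, tour0, tour1, tour2)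
--
--         deplacement.append([tour0, tour2])
--         solution_deplacement(n-1, tour1, tour2, tour0)
--
--     solution_deplacement(n)                                     #utilise deplacement pour en faire un dictionnaire qui au numeor de coup associe les positions des disques sur le jeu
--
--     plateau=init(n)                                             #initialisation situation initiale
--     solve={0:copy.deepcopy(plateau)}
--
--     for i in range (0,2**n-1):                                  #on gagne toujours en 2**n-1 coups
--         dep=deplacement[i][0]                                   #prend la valeur de la tour de départ à jouer
--
--         arr=deplacement[i][1]                                   #prend la valeur de la tour d'arrivée à jouer
--
--         disque=disqueSup(plateau,dep)                           #prend le numéro du disque qui va être déplacé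
--
--         plateau[dep].remove(disque)                             #change plateau pour déplacer le disque joué
--         plateau[arr].append(disque)
--         solve[i+1]=copy.deepcopy(plateau)                       #et l'enregistrer dans le dictionnaire
--
--
--     return deplacement,solve                                                #retourne les couples de déplacements et toutes les combinaisons dans l'ordre à jouer
-- ===== SOURCE B (Python) =====
-- def solution(n, tour0=0, tour2=2, tour1=1):
--     # One-pass variant: an explicit-stack traversal of the Hanoi recursion tree
--     # performs each move (pop/append) the moment it is generated, recording the
--     # move list and a snapshot of the board after every move (key 0 = initial
--     # board) -- no separate replay loop, no disqueSup scan, no deepcopy.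
--     # NOTE: like A, the tower parameters are accepted but unused -- A's inner
--     # recursion is invoked as solution_deplacement(n), i.e. with the default
--     # towers 0, 2, 1, so its result depends on n only; we reproduce that.
--     plateau = [list(range(n, 0, -1)), [], []]
--     deplacement = []
--     solve = {0: [list(t) for t in plateau]}
--     count = 0
--     stack = [(n, 0, 2, 1)]          # (disks, source, target, spare); top = end
--     while stack:
--         m, a, c, b = stack.pop()
--         if m > 1:
--             stack.append((m - 1, b, c, a))
--             stack.append((1, a, c, b))
--             stack.append((m - 1, a, b, c))
--         else:
--             disque = plateau[a].pop()
--             plateau[c].append(disque)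
--             deplacement.append([a, c])
--             count += 1
--             solve[count] = [list(t) for t in plateau]
--     return deplacement, solve
-- ===== Notes on version B (the rewrite author's own statement) =====
-- stated objective: faster
-- what changed: Fused the two phases into one: instead of first generating the move list recursively and then replaying it in a separate loop with disqueSup/remove and deepcopy snapshots, B performs each move (pop/append) at the moment the recursion generates it, recording the move and a shallow snapshot in the same pass; like A, the tower parameters are unused (A's inner recursion is called with its defaults).
import Mathlib
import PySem

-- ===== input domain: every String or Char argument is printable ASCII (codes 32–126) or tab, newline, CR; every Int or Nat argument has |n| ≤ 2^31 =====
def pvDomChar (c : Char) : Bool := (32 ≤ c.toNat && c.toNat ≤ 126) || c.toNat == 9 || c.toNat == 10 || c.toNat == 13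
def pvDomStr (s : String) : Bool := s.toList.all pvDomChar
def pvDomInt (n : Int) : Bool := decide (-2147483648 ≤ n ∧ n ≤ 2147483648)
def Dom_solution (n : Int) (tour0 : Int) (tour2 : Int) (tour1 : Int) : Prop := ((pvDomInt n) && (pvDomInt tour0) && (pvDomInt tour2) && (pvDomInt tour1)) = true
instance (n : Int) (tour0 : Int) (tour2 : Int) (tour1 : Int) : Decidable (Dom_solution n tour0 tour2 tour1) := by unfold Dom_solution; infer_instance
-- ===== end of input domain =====

-- B fuses A's two phases (recursive move generation, then a separate replay loop using
-- disqueSup/remove with deep snapshots) into ONE recursive pass performing each move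
-- (pop/append) as it is generated, via an explicit stack: no disqueSup scan, no
-- list.remove scan, no deepcopy (objective: a constant-factor speedup in Python).
-- Like A, the tower parameters are accepted but unused: A's inner recursion is invoked
-- with its default towers 0, 2, 1, so the result depends on n only.

-- ===== PORT A =====
-- 'while n>=1: liste+=[n]; n-=1'
def initLoop (liste : List Int) (n : Int) : List Int :=
  if h : 1 ≤ n then initLoop (liste ++ [n]) (n - 1) else liste
termination_by n.toNat
decreasing_by omega

def init3 (n : Int) : List (List Int) := [initLoop [] n, [], []]

def disqueSup (plateau : List (List Int)) (numtour : Int) : Int :=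
  -- plateau[numtour]: index is 0..2 whenever A returns (Pre_); getD [] totalizes the port
  let config := PySem.List.pyGetD plateau numtour []
  if config ≠ [] then PySem.List.pyGetD config (-1) 0 else -1

-- solution_deplacement: fuel = recursion depth; fuel 0 is Python's RecursionError (n ≤ 0, outside Pre_)
def movesA : Nat → Int → Int → Int → Int → List (List Int)
  | 0, _, _, _, _ => []
  | f + 1, n, t0, t2, t1 =>
    if n == 1 then [[t0, t2]]
    else movesA f (n - 1) t0 t1 t2 ++ [[t0, t2]] ++ movesA f (n - 1) t1 t2 t0

-- one iteration of A's replay loop (i is the range variable; remove: ValueError totalized, unreachable under Pre_)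
def stepLit (depl : List (List Int))
    (st : List (List Int) × PySem.Dict Int (List (List Int))) (i : Int) :
    List (List Int) × PySem.Dict Int (List (List Int)) :=
  let dep := PySem.List.pyGetD (PySem.List.pyGetD depl i []) 0 0
  let arr := PySem.List.pyGetD (PySem.List.pyGetD depl i []) 1 0
  let disque := disqueSup st.1 dep
  let tower := PySem.List.pyGetD st.1 dep []
  let p1 := PySem.List.pySetD st.1 dep ((PySem.List.remove? tower disque).getD tower)
  let p2 := PySem.List.pySetD p1 arr (PySem.List.pyGetD p1 arr [] ++ [disque])
  (p2, st.2.insert (i + 1) p2)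

def solution (n : Int) (tour0 : Int) (tour2 : Int) (tour1 : Int) :
    List (List Int) × (List (Int × List (List Int))) :=
  -- the Python calls solution_deplacement(n): the tower parameters are unused
  let deplacement := movesA n.toNat n 0 2 1
  let plateau := init3 n
  let solve0 : PySem.Dict Int (List (List Int)) := PySem.Dict.empty.insert 0 plateau
  let res := (PySem.List.pyRange 0 ((2 : Int) ^ n.toNat - 1) 1).foldl (stepLit deplacement) (plateau, solve0)
  (deplacement, res.2.items)

-- ===== PORT B =====
def initB (n : Int) : List (List Int) := [PySem.List.pyRange n 0 (-1), [], []]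

-- plateau, deplacement, solve, count
abbrev HState := List (List Int) × List (List Int) × PySem.Dict Int (List (List Int)) × Int

-- disque = plateau[a].pop(); plateau[c].append(disque); record move and snapshot
def doMove (a c : Int) (st : HState) : HState :=
  match PySem.List.pop? (PySem.List.pyGetD st.1 a []) (-1) with
  | none => st   -- Python IndexError (pop from empty); unreachable under Pre_
  | some (disque, rest) =>
    let p1 := PySem.List.pySetD st.1 a rest
    let p2 := PySem.List.pySetD p1 c (PySem.List.pyGetD p1 c [] ++ [disque])
    (p2, st.2.1 ++ [[a, c]], st.2.2.1.insert (st.2.2.2 + 1) p2, st.2.2.2 + 1)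

def hmeasure (fs : List (Int × Int × Int × Int)) : Nat := (fs.map (fun q => 4 ^ q.1.toNat)).sum

-- Source B's while-loop over the explicit stack; the Python stack keeps its top at the
-- END of the list (stack.pop()), modelled here with the top as the list HEAD
def runFrames : List (Int × Int × Int × Int) → HState → HState
  | [], st => st
  | (m, a, c, b) :: rest, st =>
    if 1 < m then runFrames ((m - 1, a, b, c) :: (1, a, c, b) :: (m - 1, b, c, a) :: rest) st
    else runFrames rest (doMove a c st)
termination_by fs _ => hmeasure fs
decreasing_by
  · simp only [hmeasure, List.map_cons, List.sum_cons]
    have hm1 : (m - 1).toNat + 1 = m.toNat := by omega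
    have h4 : 4 ≤ 4 ^ (m - 1).toNat := by
      calc (4:Nat) = 4 ^ 1 := rfl
      _ ≤ 4 ^ (m - 1).toNat := Nat.pow_le_pow_right (by omega) (by omega)
    have hp : 4 ^ m.toNat = 4 * 4 ^ (m - 1).toNat := by rw [← hm1, pow_succ]; ring
    rw [hp, show (4:Nat) ^ Int.toNat 1 = 4 from rfl]
    omega
  · simp only [hmeasure, List.map_cons, List.sum_cons]
    have : 0 < 4 ^ m.toNat := by positivity
    omega

def solution_alt (n : Int) (tour0 : Int) (tour2 : Int) (tour1 : Int) :
    List (List Int) × (List (Int × List (List Int))) :=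
  -- like A: the initial stack holds (n, 0, 2, 1) -- the tower parameters are unused
  let p0 := initB n
  let st := runFrames [(n, 0, 2, 1)] (p0, [], PySem.Dict.empty.insert 0 p0, 0)
  (st.2.1, st.2.2.1.items)

-- ===== PRECONDITION & SPEC =====
-- A raises RecursionError for n <= 0 (its recursion never reaches its base case);
-- it returns normally for every n >= 1, whatever the tower arguments are.
def Pre_solution (n : Int) (tour0 : Int) (tour2 : Int) (tour1 : Int) : Prop := 1 ≤ n
instance (n : Int) (tour0 : Int) (tour2 : Int) (tour1 : Int) : Decidable (Pre_solution n tour0 tour2 tour1) := by unfold Pre_solution; infer_instance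
def pvWitness_solution : Int × Int × Int × Int := (2, 0, 2, 1)

def Spec_solution (n : Int) (tour0 : Int) (tour2 : Int) (tour1 : Int) (out : List (List Int) × (List (Int × List (List Int)))) : Prop := out = solution_alt n tour0 tour2 tour1
instance (n : Int) (tour0 : Int) (tour2 : Int) (tour1 : Int) (out : List (List Int) × (List (Int × List (List Int)))) : Decidable (Spec_solution n tour0 tour2 tour1 out) := by unfold Spec_solution; infer_instance

-- ===== CLAIM (what is proved, stated in full; the proofs are below) =====
def Claim_equal_solution : Prop := ∀ (n : Int) (tour0 : Int) (tour2 : Int) (tour1 : Int), Dom_solution n tour0 tour2 tour1 → Pre_solution n tour0 tour2 tour1 → Spec_solution n tour0 tour2 tour1 (solution n tour0 tour2 tour1)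

-- ===== LEMMAS AND PROOFS =====
def stepA3 (st : List (List Int) × PySem.Dict Int (List (List Int)) × Int) (m : List Int) :
    List (List Int) × PySem.Dict Int (List (List Int)) × Int :=
  let dep := PySem.List.pyGetD m 0 0
  let arr := PySem.List.pyGetD m 1 0
  let disque := disqueSup st.1 dep
  let tower := PySem.List.pyGetD st.1 dep []
  let p1 := PySem.List.pySetD st.1 dep ((PySem.List.remove? tower disque).getD tower)
  let p2 := PySem.List.pySetD p1 arr (PySem.List.pyGetD p1 arr [] ++ [disque])
  (p2, st.2.1.insert (st.2.2 + 1) p2, st.2.2 + 1)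

def stepB (st : HState) (m : List Int) : HState :=
  doMove (PySem.List.pyGetD m 0 0) (PySem.List.pyGetD m 1 0) st

def tw (P : List (List Int)) (t : Int) : List Int := PySem.List.pyGetD P t []

def transferK (a c : Int) (k : Nat) (P : List (List Int)) : List (List Int) :=
  PySem.List.pySetD (PySem.List.pySetD P a ((tw P a).take ((tw P a).length - k))) c
    (tw P c ++ (tw P a).drop ((tw P a).length - k))

def GoodPair (a c : Int) : Prop := (a = 0 ∧ c = 1) ∨ (a = 0 ∧ c = 2) ∨ (a = 1 ∧ c = 0) ∨ (a = 1 ∧ c = 2) ∨ (a = 2 ∧ c = 0) ∨ (a = 2 ∧ c = 1)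

def GoodTriple (a c b : Int) : Prop := (a = 0 ∧ c = 2 ∧ b = 1) ∨ (a = 0 ∧ c = 1 ∧ b = 2) ∨ (a = 1 ∧ c = 0 ∧ b = 2) ∨ (a = 1 ∧ c = 2 ∧ b = 0) ∨ (a = 2 ∧ c = 0 ∧ b = 1) ∨ (a = 2 ∧ c = 1 ∧ b = 0)

lemma tK01 (k : Nat) (x y z : List Int) :
    transferK 0 1 k [x, y, z] = [x.take (x.length - k), y ++ x.drop (x.length - k), z] := rfl

lemma tK02 (k : Nat) (x y z : List Int) :
    transferK 0 2 k [x, y, z] = [x.take (x.length - k), y, z ++ x.drop (x.length - k)] := rfl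

lemma tK10 (k : Nat) (x y z : List Int) :
    transferK 1 0 k [x, y, z] = [x ++ y.drop (y.length - k), y.take (y.length - k), z] := rfl

lemma tK12 (k : Nat) (x y z : List Int) :
    transferK 1 2 k [x, y, z] = [x, y.take (y.length - k), z ++ y.drop (y.length - k)] := rfl

lemma tK20 (k : Nat) (x y z : List Int) :
    transferK 2 0 k [x, y, z] = [x ++ z.drop (z.length - k), y, z.take (z.length - k)] := rfl

lemma tK21 (k : Nat) (x y z : List Int) :
    transferK 2 1 k [x, y, z] = [x, y ++ z.drop (z.length - k), z.take (z.length - k)] := rfl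

lemma concat_of_ne_nil {w : List Int} (h : w ≠ []) : ∃ ws d, w = ws ++ [d] := by
  induction w using List.reverseRecOn with
  | nil => simp at h
  | append_singleton ws d _ => exact ⟨ws, d, rfl⟩

lemma remove_last (ws : List Int) (d : Int) (h : d ∉ ws) :
    PySem.List.remove? (ws ++ [d]) d = some ws := by
  rw [PySem.List.remove?_eq_some_erase (ws ++ [d]) d (by simp)]
  simp [List.erase_append, h]

lemma take_drop_chain (x : List Int) (j : Nat) (hj : j ≤ x.length) :
    (x.take j).drop (j-1) ++ x.drop j = x.drop (j-1) := by
  conv_rhs => rw [← List.take_append_drop j x]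
  rw [List.drop_append_of_le_length (by simp; omega)]

lemma transferK_perm (a c : Int) (h : GoodPair a c) (k : Nat) (x y z : List Int) :
    ((transferK a c k [x,y,z]).flatten).Perm (x ++ y ++ z) := by
  rcases h with ⟨rfl,rfl⟩|⟨rfl,rfl⟩|⟨rfl,rfl⟩|⟨rfl,rfl⟩|⟨rfl,rfl⟩|⟨rfl,rfl⟩
  · rw [tK01, List.perm_iff_count]; intro e
    simp only [List.flatten_cons, List.flatten_nil, List.append_nil, List.count_append]
    have hs : (x.take (x.length - k)).count e + (x.drop (x.length - k)).count e = x.count e := by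
      rw [← List.count_append, List.take_append_drop]
    omega
  · rw [tK02, List.perm_iff_count]; intro e
    simp only [List.flatten_cons, List.flatten_nil, List.append_nil, List.count_append]
    have hs : (x.take (x.length - k)).count e + (x.drop (x.length - k)).count e = x.count e := by
      rw [← List.count_append, List.take_append_drop]
    omega
  · rw [tK10, List.perm_iff_count]; intro e
    simp only [List.flatten_cons, List.flatten_nil, List.append_nil, List.count_append]
    have hs : (y.take (y.length - k)).count e + (y.drop (y.length - k)).count e = y.count e := by
      rw [← List.count_append, List.take_append_drop]
    omega
  · rw [tK12, List.perm_iff_count]; intro e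
    simp only [List.flatten_cons, List.flatten_nil, List.append_nil, List.count_append]
    have hs : (y.take (y.length - k)).count e + (y.drop (y.length - k)).count e = y.count e := by
      rw [← List.count_append, List.take_append_drop]
    omega
  · rw [tK20, List.perm_iff_count]; intro e
    simp only [List.flatten_cons, List.flatten_nil, List.append_nil, List.count_append]
    have hs : (z.take (z.length - k)).count e + (z.drop (z.length - k)).count e = z.count e := by
      rw [← List.count_append, List.take_append_drop]
    omega
  · rw [tK21, List.perm_iff_count]; intro e
    simp only [List.flatten_cons, List.flatten_nil, List.append_nil, List.count_append]
    have hs : (z.take (z.length - k)).count e + (z.drop (z.length - k)).count e = z.count e := by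
      rw [← List.count_append, List.take_append_drop]
    omega

lemma step_eq (a c : Int) (h : GoodPair a c) (x y z : List Int)
    (s : PySem.Dict Int (List (List Int))) (cnt : Int) (dep : List (List Int))
    (hne : tw [x,y,z] a ≠ []) (hnd : (x ++ y ++ z).Nodup) :
    stepA3 ([x,y,z], s, cnt) [a,c]
        = (transferK a c 1 [x,y,z], s.insert (cnt+1) (transferK a c 1 [x,y,z]), cnt+1)
      ∧ stepB ([x,y,z], dep, s, cnt) [a,c]
        = (transferK a c 1 [x,y,z], dep ++ [[a,c]], s.insert (cnt+1) (transferK a c 1 [x,y,z]), cnt+1) := by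
  rcases h with ⟨rfl,rfl⟩|⟨rfl,rfl⟩|⟨rfl,rfl⟩|⟨rfl,rfl⟩|⟨rfl,rfl⟩|⟨rfl,rfl⟩
  · have hxne : x ≠ [] := by simpa [tw] using hne
    obtain ⟨ws, d, rfl⟩ := concat_of_ne_nil hxne
    have hxnd : (ws ++ [d]).Nodup := hnd.of_append_left.of_append_left
    have hd : d ∉ ws := by simp [List.nodup_append] at hxnd; tauto
    have htake : (ws ++ [d]).take ((ws ++ [d]).length - 1) = ws := by simp [List.take_left']
    have hdrop : (ws ++ [d]).drop ((ws ++ [d]).length - 1) = [d] := by simp [List.drop_left']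
    have hg0 : PySem.List.pyGetD ([0,1] : List Int) 0 0 = 0 := rfl
    have hg1 : PySem.List.pyGetD ([0,1] : List Int) 1 0 = 1 := rfl
    have hgA : PySem.List.pyGetD [ws ++ [d], y, z] 0 [] = ws ++ [d] := rfl
    have hset0 : ∀ v : List Int, PySem.List.pySetD [ws ++ [d], y, z] 0 v = [v, y, z] := fun _ => rfl
    have hget1 : ∀ v : List Int, PySem.List.pyGetD [v, y, z] 1 [] = y := fun _ => rfl
    have hset1 : ∀ v w : List Int, PySem.List.pySetD [v, y, z] 1 w = [v, w, z] := fun _ _ => rfl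
    constructor
    · simp only [stepA3, hg0, hg1, disqueSup, tK01, hgA,
        PySem.List.pyGetD_neg_one_append_singleton, if_pos (show ws ++ [d] ≠ [] by simp),
        remove_last ws d hd, Option.getD_some, htake, hdrop, hset0, hget1, hset1]
    · simp only [stepB, hg0, hg1, doMove, hgA,
        PySem.List.pop?_last, tK01, htake, hdrop, hset0, hget1, hset1]
  · have hxne : x ≠ [] := by simpa [tw] using hne
    obtain ⟨ws, d, rfl⟩ := concat_of_ne_nil hxne
    have hxnd : (ws ++ [d]).Nodup := hnd.of_append_left.of_append_left
    have hd : d ∉ ws := by simp [List.nodup_append] at hxnd; tauto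
    have htake : (ws ++ [d]).take ((ws ++ [d]).length - 1) = ws := by simp [List.take_left']
    have hdrop : (ws ++ [d]).drop ((ws ++ [d]).length - 1) = [d] := by simp [List.drop_left']
    have hg0 : PySem.List.pyGetD ([0,2] : List Int) 0 0 = 0 := rfl
    have hg1 : PySem.List.pyGetD ([0,2] : List Int) 1 0 = 2 := rfl
    have hgA : PySem.List.pyGetD [ws ++ [d], y, z] 0 [] = ws ++ [d] := rfl
    have hset0 : ∀ v : List Int, PySem.List.pySetD [ws ++ [d], y, z] 0 v = [v, y, z] := fun _ => rfl
    have hget1 : ∀ v : List Int, PySem.List.pyGetD [v, y, z] 2 [] = z := fun _ => rfl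
    have hset1 : ∀ v w : List Int, PySem.List.pySetD [v, y, z] 2 w = [v, y, w] := fun _ _ => rfl
    constructor
    · simp only [stepA3, hg0, hg1, disqueSup, tK02, hgA,
        PySem.List.pyGetD_neg_one_append_singleton, if_pos (show ws ++ [d] ≠ [] by simp),
        remove_last ws d hd, Option.getD_some, htake, hdrop, hset0, hget1, hset1]
    · simp only [stepB, hg0, hg1, doMove, hgA,
        PySem.List.pop?_last, tK02, htake, hdrop, hset0, hget1, hset1]
  · have hxne : y ≠ [] := by simpa [tw] using hne
    obtain ⟨ws, d, rfl⟩ := concat_of_ne_nil hxne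
    have hxnd : (ws ++ [d]).Nodup := hnd.of_append_left.of_append_right
    have hd : d ∉ ws := by simp [List.nodup_append] at hxnd; tauto
    have htake : (ws ++ [d]).take ((ws ++ [d]).length - 1) = ws := by simp [List.take_left']
    have hdrop : (ws ++ [d]).drop ((ws ++ [d]).length - 1) = [d] := by simp [List.drop_left']
    have hg0 : PySem.List.pyGetD ([1,0] : List Int) 0 0 = 1 := rfl
    have hg1 : PySem.List.pyGetD ([1,0] : List Int) 1 0 = 0 := rfl
    have hgA : PySem.List.pyGetD [x, ws ++ [d], z] 1 [] = ws ++ [d] := rfl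
    have hset0 : ∀ v : List Int, PySem.List.pySetD [x, ws ++ [d], z] 1 v = [x, v, z] := fun _ => rfl
    have hget1 : ∀ v : List Int, PySem.List.pyGetD [x, v, z] 0 [] = x := fun _ => rfl
    have hset1 : ∀ v w : List Int, PySem.List.pySetD [x, v, z] 0 w = [w, v, z] := fun _ _ => rfl
    constructor
    · simp only [stepA3, hg0, hg1, disqueSup, tK10, hgA,
        PySem.List.pyGetD_neg_one_append_singleton, if_pos (show ws ++ [d] ≠ [] by simp),
        remove_last ws d hd, Option.getD_some, htake, hdrop, hset0, hget1, hset1]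
    · simp only [stepB, hg0, hg1, doMove, hgA,
        PySem.List.pop?_last, tK10, htake, hdrop, hset0, hget1, hset1]
  · have hxne : y ≠ [] := by simpa [tw] using hne
    obtain ⟨ws, d, rfl⟩ := concat_of_ne_nil hxne
    have hxnd : (ws ++ [d]).Nodup := hnd.of_append_left.of_append_right
    have hd : d ∉ ws := by simp [List.nodup_append] at hxnd; tauto
    have htake : (ws ++ [d]).take ((ws ++ [d]).length - 1) = ws := by simp [List.take_left']
    have hdrop : (ws ++ [d]).drop ((ws ++ [d]).length - 1) = [d] := by simp [List.drop_left']
    have hg0 : PySem.List.pyGetD ([1,2] : List Int) 0 0 = 1 := rfl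
    have hg1 : PySem.List.pyGetD ([1,2] : List Int) 1 0 = 2 := rfl
    have hgA : PySem.List.pyGetD [x, ws ++ [d], z] 1 [] = ws ++ [d] := rfl
    have hset0 : ∀ v : List Int, PySem.List.pySetD [x, ws ++ [d], z] 1 v = [x, v, z] := fun _ => rfl
    have hget1 : ∀ v : List Int, PySem.List.pyGetD [x, v, z] 2 [] = z := fun _ => rfl
    have hset1 : ∀ v w : List Int, PySem.List.pySetD [x, v, z] 2 w = [x, v, w] := fun _ _ => rfl
    constructor
    · simp only [stepA3, hg0, hg1, disqueSup, tK12, hgA,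
        PySem.List.pyGetD_neg_one_append_singleton, if_pos (show ws ++ [d] ≠ [] by simp),
        remove_last ws d hd, Option.getD_some, htake, hdrop, hset0, hget1, hset1]
    · simp only [stepB, hg0, hg1, doMove, hgA,
        PySem.List.pop?_last, tK12, htake, hdrop, hset0, hget1, hset1]
  · have hxne : z ≠ [] := by simpa [tw] using hne
    obtain ⟨ws, d, rfl⟩ := concat_of_ne_nil hxne
    have hxnd : (ws ++ [d]).Nodup := hnd.of_append_right
    have hd : d ∉ ws := by simp [List.nodup_append] at hxnd; tauto
    have htake : (ws ++ [d]).take ((ws ++ [d]).length - 1) = ws := by simp [List.take_left']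
    have hdrop : (ws ++ [d]).drop ((ws ++ [d]).length - 1) = [d] := by simp [List.drop_left']
    have hg0 : PySem.List.pyGetD ([2,0] : List Int) 0 0 = 2 := rfl
    have hg1 : PySem.List.pyGetD ([2,0] : List Int) 1 0 = 0 := rfl
    have hgA : PySem.List.pyGetD [x, y, ws ++ [d]] 2 [] = ws ++ [d] := rfl
    have hset0 : ∀ v : List Int, PySem.List.pySetD [x, y, ws ++ [d]] 2 v = [x, y, v] := fun _ => rfl
    have hget1 : ∀ v : List Int, PySem.List.pyGetD [x, y, v] 0 [] = x := fun _ => rfl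
    have hset1 : ∀ v w : List Int, PySem.List.pySetD [x, y, v] 0 w = [w, y, v] := fun _ _ => rfl
    constructor
    · simp only [stepA3, hg0, hg1, disqueSup, tK20, hgA,
        PySem.List.pyGetD_neg_one_append_singleton, if_pos (show ws ++ [d] ≠ [] by simp),
        remove_last ws d hd, Option.getD_some, htake, hdrop, hset0, hget1, hset1]
    · simp only [stepB, hg0, hg1, doMove, hgA,
        PySem.List.pop?_last, tK20, htake, hdrop, hset0, hget1, hset1]
  · have hxne : z ≠ [] := by simpa [tw] using hne
    obtain ⟨ws, d, rfl⟩ := concat_of_ne_nil hxne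
    have hxnd : (ws ++ [d]).Nodup := hnd.of_append_right
    have hd : d ∉ ws := by simp [List.nodup_append] at hxnd; tauto
    have htake : (ws ++ [d]).take ((ws ++ [d]).length - 1) = ws := by simp [List.take_left']
    have hdrop : (ws ++ [d]).drop ((ws ++ [d]).length - 1) = [d] := by simp [List.drop_left']
    have hg0 : PySem.List.pyGetD ([2,1] : List Int) 0 0 = 2 := rfl
    have hg1 : PySem.List.pyGetD ([2,1] : List Int) 1 0 = 1 := rfl
    have hgA : PySem.List.pyGetD [x, y, ws ++ [d]] 2 [] = ws ++ [d] := rfl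
    have hset0 : ∀ v : List Int, PySem.List.pySetD [x, y, ws ++ [d]] 2 v = [x, y, v] := fun _ => rfl
    have hget1 : ∀ v : List Int, PySem.List.pyGetD [x, y, v] 1 [] = y := fun _ => rfl
    have hset1 : ∀ v w : List Int, PySem.List.pySetD [x, y, v] 1 w = [x, w, v] := fun _ _ => rfl
    constructor
    · simp only [stepA3, hg0, hg1, disqueSup, tK21, hgA,
        PySem.List.pyGetD_neg_one_append_singleton, if_pos (show ws ++ [d] ≠ [] by simp),
        remove_last ws d hd, Option.getD_some, htake, hdrop, hset0, hget1, hset1]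
    · simp only [stepB, hg0, hg1, doMove, hgA,
        PySem.List.pop?_last, tK21, htake, hdrop, hset0, hget1, hset1]

lemma main (fuel : Nat) : ∀ (n a c b : Int) (x y z : List Int) (s : PySem.Dict Int (List (List Int))) (cnt : Int) (dep : List (List Int)),
    1 ≤ n → n ≤ (fuel : Int) → GoodTriple a c b → (x ++ y ++ z).Nodup →
    n ≤ ((tw [x,y,z] a).length : Int) →
    ((movesA fuel n a c b).foldl stepA3 ([x,y,z], s, cnt)).1 = transferK a c n.toNat [x,y,z]
    ∧ (movesA fuel n a c b).foldl stepB ([x,y,z], dep, s, cnt)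
        = (((movesA fuel n a c b).foldl stepA3 ([x,y,z], s, cnt)).1,
           dep ++ movesA fuel n a c b,
           ((movesA fuel n a c b).foldl stepA3 ([x,y,z], s, cnt)).2.1,
           ((movesA fuel n a c b).foldl stepA3 ([x,y,z], s, cnt)).2.2) := by
  induction fuel with
  | zero => intro n a c b x y z s cnt dep h1 h2 _ _ _; exfalso; omega
  | succ f ih =>
    intro n a c b x y z s cnt dep h1 h2 htr hnd hlen
    by_cases hn : n = 1
    · subst hn
      have hmv : movesA (f+1) 1 a c b = [[a,c]] := by simp [movesA]
      have hpair : GoodPair a c := by unfold GoodTriple at htr; unfold GoodPair; tauto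
      have hne : tw [x,y,z] a ≠ [] := List.ne_nil_of_length_pos (by omega)
      obtain ⟨hA, hB⟩ := step_eq a c hpair x y z s cnt dep hne hnd
      rw [hmv]
      simp only [List.foldl_cons, List.foldl_nil]
      refine ⟨by rw [hA]; try rfl, by rw [hB, hA]; try rfl⟩
    · have hn2 : 2 ≤ n := by omega
      have hk1 : 1 ≤ (n-1).toNat := by omega
      have hnt : n.toNat = (n-1).toNat + 1 := by omega
      have hmv : movesA (f+1) n a c b = movesA f (n-1) a b c ++ [[a,c]] ++ movesA f (n-1) b c a := by
        simp only [movesA, show (n == 1) = false by simp [hn], Bool.false_eq_true, if_false]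
      rcases htr with ⟨rfl,rfl,rfl⟩|⟨rfl,rfl,rfl⟩|⟨rfl,rfl,rfl⟩|⟨rfl,rfl,rfl⟩|⟨rfl,rfl,rfl⟩|⟨rfl,rfl,rfl⟩
      · -- case a=0, c=2, b=1
        have hlenA : n ≤ ((x).length : Int) := by rw [show tw [x,y,z] (0:Int) = x from rfl] at hlen; exact hlen
        have hm : (n-1).toNat + 1 ≤ x.length := by omega
        obtain ⟨A1, B1⟩ := ih (n-1) 0 1 2 x y z s cnt dep (by omega) (by omega) (by simp [GoodTriple]) hnd
          (by rw [show tw [x,y,z] (0:Int) = x from rfl]; omega)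
        rw [tK01] at A1
        have hndP1 : ((x.take (x.length - (n-1).toNat)) ++ (y ++ x.drop (x.length - (n-1).toNat)) ++ (z)).Nodup := by
          have hp := transferK_perm 0 1 (by simp [GoodPair]) (n-1).toNat x y z
          rw [tK01] at hp
          simp only [List.flatten_cons, List.flatten_nil, List.append_nil] at hp
          rw [List.append_assoc]
          exact hp.nodup_iff.mpr hnd
        have hneP1 : tw [x.take (x.length - (n-1).toNat), y ++ x.drop (x.length - (n-1).toNat), z] 0 ≠ [] := by
          rw [show tw [x.take (x.length - (n-1).toNat), y ++ x.drop (x.length - (n-1).toNat), z] (0:Int) = x.take (x.length - (n-1).toNat) from rfl]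
          apply List.ne_nil_of_length_pos
          simp only [List.length_take]
          omega
        set ms1 := movesA f (n-1) 0 1 2 with hms1
        set r1 := ms1.foldl stepA3 ([x,y,z], s, cnt) with hr1
        obtain ⟨A2, B2⟩ := step_eq 0 2 (by simp [GoodPair]) (x.take (x.length - (n-1).toNat)) (y ++ x.drop (x.length - (n-1).toNat)) (z)
          r1.2.1 r1.2.2 (dep ++ ms1) hneP1 hndP1
        rw [tK02] at A2 B2
        have hndP2 : (((x.take (x.length - (n-1).toNat)).take ((x.take (x.length - (n-1).toNat)).length - 1)) ++ (y ++ x.drop (x.length - (n-1).toNat)) ++ (z ++ (x.take (x.length - (n-1).toNat)).drop ((x.take (x.length - (n-1).toNat)).length - 1))).Nodup := by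
          have hp := transferK_perm 0 2 (by simp [GoodPair]) 1 (x.take (x.length - (n-1).toNat)) (y ++ x.drop (x.length - (n-1).toNat)) (z)
          rw [tK02] at hp
          simp only [List.flatten_cons, List.flatten_nil, List.append_nil] at hp
          rw [List.append_assoc]
          exact hp.nodup_iff.mpr hndP1
        have hAd : (x.drop (x.length - (n-1).toNat)).length = (n-1).toNat := by simp only [List.length_drop]; omega
        have hlb : (y ++ x.drop (x.length - (n-1).toNat)).length - (n-1).toNat = y.length := by simp only [List.length_append, hAd]; omega
        obtain ⟨A3, B3⟩ := ih (n-1) 1 2 0 ((x.take (x.length - (n-1).toNat)).take ((x.take (x.length - (n-1).toNat)).length - 1)) (y ++ x.drop (x.length - (n-1).toNat)) (z ++ (x.take (x.length - (n-1).toNat)).drop ((x.take (x.length - (n-1).toNat)).length - 1))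
          (r1.2.1.insert (r1.2.2 + 1) [(x.take (x.length - (n-1).toNat)).take ((x.take (x.length - (n-1).toNat)).length - 1), y ++ x.drop (x.length - (n-1).toNat), z ++ (x.take (x.length - (n-1).toNat)).drop ((x.take (x.length - (n-1).toNat)).length - 1)]) (r1.2.2 + 1) ((dep ++ ms1) ++ [[0,2]])
          (by omega) (by omega) (by simp [GoodTriple]) hndP2
          (by rw [show tw [(x.take (x.length - (n-1).toNat)).take ((x.take (x.length - (n-1).toNat)).length - 1), y ++ x.drop (x.length - (n-1).toNat), z ++ (x.take (x.length - (n-1).toNat)).drop ((x.take (x.length - (n-1).toNat)).length - 1)] (1:Int) = y ++ x.drop (x.length - (n-1).toNat) from rfl]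
              have : (y ++ x.drop (x.length - (n-1).toNat)).length = y.length + (n-1).toNat := by rw [List.length_append, hAd]
              omega)
        rw [tK12] at A3
        have hEb : (y ++ x.drop (x.length - (n-1).toNat)).take ((y ++ x.drop (x.length - (n-1).toNat)).length - (n-1).toNat) = y := by rw [hlb, List.take_left]
        have hEbd : (y ++ x.drop (x.length - (n-1).toNat)).drop ((y ++ x.drop (x.length - (n-1).toNat)).length - (n-1).toNat) = x.drop (x.length - (n-1).toNat) := by rw [hlb, List.drop_left]
        have hEa : ((x.take (x.length - (n-1).toNat)).take ((x.take (x.length - (n-1).toNat)).length - 1)) = x.take (x.length - ((n-1).toNat + 1)) := by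
          rw [List.take_take]
          congr 1
          simp only [List.length_take]
          omega
        have hEc : (x.take (x.length - (n-1).toNat)).drop ((x.take (x.length - (n-1).toNat)).length - 1) ++ (x.drop (x.length - (n-1).toNat)) = x.drop (x.length - ((n-1).toNat + 1)) := by
          have h1 : (x.take (x.length - (n-1).toNat)).length = x.length - (n-1).toNat := by simp only [List.length_take]; omega
          rw [h1]
          have h2 := take_drop_chain x (x.length - (n-1).toNat) (by omega)
          rw [h2]
          congr 1
          try omega
        constructor
        · rw [hmv]
          simp only [List.foldl_append, List.foldl_cons, List.foldl_nil, ← hr1]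
          rw [show r1 = (r1.1, r1.2.1, r1.2.2) from rfl, A1, A2, A3, hnt]
          rw [tK02]
          rw [hEb, hEbd, hEa]
          rw [List.append_assoc, hEc]
        · rw [hmv]
          simp only [List.foldl_append, List.foldl_cons, List.foldl_nil, ← hr1]
          rw [show r1 = (r1.1, r1.2.1, r1.2.2) from rfl] at B1 ⊢
          rw [B1, A1, B2, A2, B3]
          simp [List.append_assoc]
      · -- case a=0, c=1, b=2
        have hlenA : n ≤ ((x).length : Int) := by rw [show tw [x,y,z] (0:Int) = x from rfl] at hlen; exact hlen
        have hm : (n-1).toNat + 1 ≤ x.length := by omega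
        obtain ⟨A1, B1⟩ := ih (n-1) 0 2 1 x y z s cnt dep (by omega) (by omega) (by simp [GoodTriple]) hnd
          (by rw [show tw [x,y,z] (0:Int) = x from rfl]; omega)
        rw [tK02] at A1
        have hndP1 : ((x.take (x.length - (n-1).toNat)) ++ (y) ++ (z ++ x.drop (x.length - (n-1).toNat))).Nodup := by
          have hp := transferK_perm 0 2 (by simp [GoodPair]) (n-1).toNat x y z
          rw [tK02] at hp
          simp only [List.flatten_cons, List.flatten_nil, List.append_nil] at hp
          rw [List.append_assoc]
          exact hp.nodup_iff.mpr hnd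
        have hneP1 : tw [x.take (x.length - (n-1).toNat), y, z ++ x.drop (x.length - (n-1).toNat)] 0 ≠ [] := by
          rw [show tw [x.take (x.length - (n-1).toNat), y, z ++ x.drop (x.length - (n-1).toNat)] (0:Int) = x.take (x.length - (n-1).toNat) from rfl]
          apply List.ne_nil_of_length_pos
          simp only [List.length_take]
          omega
        set ms1 := movesA f (n-1) 0 2 1 with hms1
        set r1 := ms1.foldl stepA3 ([x,y,z], s, cnt) with hr1
        obtain ⟨A2, B2⟩ := step_eq 0 1 (by simp [GoodPair]) (x.take (x.length - (n-1).toNat)) (y) (z ++ x.drop (x.length - (n-1).toNat))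
          r1.2.1 r1.2.2 (dep ++ ms1) hneP1 hndP1
        rw [tK01] at A2 B2
        have hndP2 : (((x.take (x.length - (n-1).toNat)).take ((x.take (x.length - (n-1).toNat)).length - 1)) ++ (y ++ (x.take (x.length - (n-1).toNat)).drop ((x.take (x.length - (n-1).toNat)).length - 1)) ++ (z ++ x.drop (x.length - (n-1).toNat))).Nodup := by
          have hp := transferK_perm 0 1 (by simp [GoodPair]) 1 (x.take (x.length - (n-1).toNat)) (y) (z ++ x.drop (x.length - (n-1).toNat))
          rw [tK01] at hp
          simp only [List.flatten_cons, List.flatten_nil, List.append_nil] at hp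
          rw [List.append_assoc]
          exact hp.nodup_iff.mpr hndP1
        have hAd : (x.drop (x.length - (n-1).toNat)).length = (n-1).toNat := by simp only [List.length_drop]; omega
        have hlb : (z ++ x.drop (x.length - (n-1).toNat)).length - (n-1).toNat = z.length := by simp only [List.length_append, hAd]; omega
        obtain ⟨A3, B3⟩ := ih (n-1) 2 1 0 ((x.take (x.length - (n-1).toNat)).take ((x.take (x.length - (n-1).toNat)).length - 1)) (y ++ (x.take (x.length - (n-1).toNat)).drop ((x.take (x.length - (n-1).toNat)).length - 1)) (z ++ x.drop (x.length - (n-1).toNat))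
          (r1.2.1.insert (r1.2.2 + 1) [(x.take (x.length - (n-1).toNat)).take ((x.take (x.length - (n-1).toNat)).length - 1), y ++ (x.take (x.length - (n-1).toNat)).drop ((x.take (x.length - (n-1).toNat)).length - 1), z ++ x.drop (x.length - (n-1).toNat)]) (r1.2.2 + 1) ((dep ++ ms1) ++ [[0,1]])
          (by omega) (by omega) (by simp [GoodTriple]) hndP2
          (by rw [show tw [(x.take (x.length - (n-1).toNat)).take ((x.take (x.length - (n-1).toNat)).length - 1), y ++ (x.take (x.length - (n-1).toNat)).drop ((x.take (x.length - (n-1).toNat)).length - 1), z ++ x.drop (x.length - (n-1).toNat)] (2:Int) = z ++ x.drop (x.length - (n-1).toNat) from rfl]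
              have : (z ++ x.drop (x.length - (n-1).toNat)).length = z.length + (n-1).toNat := by rw [List.length_append, hAd]
              omega)
        rw [tK21] at A3
        have hEb : (z ++ x.drop (x.length - (n-1).toNat)).take ((z ++ x.drop (x.length - (n-1).toNat)).length - (n-1).toNat) = z := by rw [hlb, List.take_left]
        have hEbd : (z ++ x.drop (x.length - (n-1).toNat)).drop ((z ++ x.drop (x.length - (n-1).toNat)).length - (n-1).toNat) = x.drop (x.length - (n-1).toNat) := by rw [hlb, List.drop_left]
        have hEa : ((x.take (x.length - (n-1).toNat)).take ((x.take (x.length - (n-1).toNat)).length - 1)) = x.take (x.length - ((n-1).toNat + 1)) := by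
          rw [List.take_take]
          congr 1
          simp only [List.length_take]
          omega
        have hEc : (x.take (x.length - (n-1).toNat)).drop ((x.take (x.length - (n-1).toNat)).length - 1) ++ (x.drop (x.length - (n-1).toNat)) = x.drop (x.length - ((n-1).toNat + 1)) := by
          have h1 : (x.take (x.length - (n-1).toNat)).length = x.length - (n-1).toNat := by simp only [List.length_take]; omega
          rw [h1]
          have h2 := take_drop_chain x (x.length - (n-1).toNat) (by omega)
          rw [h2]
          congr 1
          try omega
        constructor
        · rw [hmv]
          simp only [List.foldl_append, List.foldl_cons, List.foldl_nil, ← hr1]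
          rw [show r1 = (r1.1, r1.2.1, r1.2.2) from rfl, A1, A2, A3, hnt]
          rw [tK01]
          rw [hEb, hEbd, hEa]
          rw [List.append_assoc, hEc]
        · rw [hmv]
          simp only [List.foldl_append, List.foldl_cons, List.foldl_nil, ← hr1]
          rw [show r1 = (r1.1, r1.2.1, r1.2.2) from rfl] at B1 ⊢
          rw [B1, A1, B2, A2, B3]
          simp [List.append_assoc]
      · -- case a=1, c=0, b=2
        have hlenA : n ≤ ((y).length : Int) := by rw [show tw [x,y,z] (1:Int) = y from rfl] at hlen; exact hlen
        have hm : (n-1).toNat + 1 ≤ y.length := by omega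
        obtain ⟨A1, B1⟩ := ih (n-1) 1 2 0 x y z s cnt dep (by omega) (by omega) (by simp [GoodTriple]) hnd
          (by rw [show tw [x,y,z] (1:Int) = y from rfl]; omega)
        rw [tK12] at A1
        have hndP1 : ((x) ++ (y.take (y.length - (n-1).toNat)) ++ (z ++ y.drop (y.length - (n-1).toNat))).Nodup := by
          have hp := transferK_perm 1 2 (by simp [GoodPair]) (n-1).toNat x y z
          rw [tK12] at hp
          simp only [List.flatten_cons, List.flatten_nil, List.append_nil] at hp
          rw [List.append_assoc]
          exact hp.nodup_iff.mpr hnd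
        have hneP1 : tw [x, y.take (y.length - (n-1).toNat), z ++ y.drop (y.length - (n-1).toNat)] 1 ≠ [] := by
          rw [show tw [x, y.take (y.length - (n-1).toNat), z ++ y.drop (y.length - (n-1).toNat)] (1:Int) = y.take (y.length - (n-1).toNat) from rfl]
          apply List.ne_nil_of_length_pos
          simp only [List.length_take]
          omega
        set ms1 := movesA f (n-1) 1 2 0 with hms1
        set r1 := ms1.foldl stepA3 ([x,y,z], s, cnt) with hr1
        obtain ⟨A2, B2⟩ := step_eq 1 0 (by simp [GoodPair]) (x) (y.take (y.length - (n-1).toNat)) (z ++ y.drop (y.length - (n-1).toNat))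
          r1.2.1 r1.2.2 (dep ++ ms1) hneP1 hndP1
        rw [tK10] at A2 B2
        have hndP2 : ((x ++ (y.take (y.length - (n-1).toNat)).drop ((y.take (y.length - (n-1).toNat)).length - 1)) ++ ((y.take (y.length - (n-1).toNat)).take ((y.take (y.length - (n-1).toNat)).length - 1)) ++ (z ++ y.drop (y.length - (n-1).toNat))).Nodup := by
          have hp := transferK_perm 1 0 (by simp [GoodPair]) 1 (x) (y.take (y.length - (n-1).toNat)) (z ++ y.drop (y.length - (n-1).toNat))
          rw [tK10] at hp
          simp only [List.flatten_cons, List.flatten_nil, List.append_nil] at hp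
          rw [List.append_assoc]
          exact hp.nodup_iff.mpr hndP1
        have hAd : (y.drop (y.length - (n-1).toNat)).length = (n-1).toNat := by simp only [List.length_drop]; omega
        have hlb : (z ++ y.drop (y.length - (n-1).toNat)).length - (n-1).toNat = z.length := by simp only [List.length_append, hAd]; omega
        obtain ⟨A3, B3⟩ := ih (n-1) 2 0 1 (x ++ (y.take (y.length - (n-1).toNat)).drop ((y.take (y.length - (n-1).toNat)).length - 1)) ((y.take (y.length - (n-1).toNat)).take ((y.take (y.length - (n-1).toNat)).length - 1)) (z ++ y.drop (y.length - (n-1).toNat))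
          (r1.2.1.insert (r1.2.2 + 1) [x ++ (y.take (y.length - (n-1).toNat)).drop ((y.take (y.length - (n-1).toNat)).length - 1), (y.take (y.length - (n-1).toNat)).take ((y.take (y.length - (n-1).toNat)).length - 1), z ++ y.drop (y.length - (n-1).toNat)]) (r1.2.2 + 1) ((dep ++ ms1) ++ [[1,0]])
          (by omega) (by omega) (by simp [GoodTriple]) hndP2
          (by rw [show tw [x ++ (y.take (y.length - (n-1).toNat)).drop ((y.take (y.length - (n-1).toNat)).length - 1), (y.take (y.length - (n-1).toNat)).take ((y.take (y.length - (n-1).toNat)).length - 1), z ++ y.drop (y.length - (n-1).toNat)] (2:Int) = z ++ y.drop (y.length - (n-1).toNat) from rfl]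
              have : (z ++ y.drop (y.length - (n-1).toNat)).length = z.length + (n-1).toNat := by rw [List.length_append, hAd]
              omega)
        rw [tK20] at A3
        have hEb : (z ++ y.drop (y.length - (n-1).toNat)).take ((z ++ y.drop (y.length - (n-1).toNat)).length - (n-1).toNat) = z := by rw [hlb, List.take_left]
        have hEbd : (z ++ y.drop (y.length - (n-1).toNat)).drop ((z ++ y.drop (y.length - (n-1).toNat)).length - (n-1).toNat) = y.drop (y.length - (n-1).toNat) := by rw [hlb, List.drop_left]
        have hEa : ((y.take (y.length - (n-1).toNat)).take ((y.take (y.length - (n-1).toNat)).length - 1)) = y.take (y.length - ((n-1).toNat + 1)) := by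
          rw [List.take_take]
          congr 1
          simp only [List.length_take]
          omega
        have hEc : (y.take (y.length - (n-1).toNat)).drop ((y.take (y.length - (n-1).toNat)).length - 1) ++ (y.drop (y.length - (n-1).toNat)) = y.drop (y.length - ((n-1).toNat + 1)) := by
          have h1 : (y.take (y.length - (n-1).toNat)).length = y.length - (n-1).toNat := by simp only [List.length_take]; omega
          rw [h1]
          have h2 := take_drop_chain y (y.length - (n-1).toNat) (by omega)
          rw [h2]
          congr 1
          try omega
        constructor
        · rw [hmv]
          simp only [List.foldl_append, List.foldl_cons, List.foldl_nil, ← hr1]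
          rw [show r1 = (r1.1, r1.2.1, r1.2.2) from rfl, A1, A2, A3, hnt]
          rw [tK10]
          rw [hEb, hEbd, hEa]
          rw [List.append_assoc, hEc]
        · rw [hmv]
          simp only [List.foldl_append, List.foldl_cons, List.foldl_nil, ← hr1]
          rw [show r1 = (r1.1, r1.2.1, r1.2.2) from rfl] at B1 ⊢
          rw [B1, A1, B2, A2, B3]
          simp [List.append_assoc]
      · -- case a=1, c=2, b=0
        have hlenA : n ≤ ((y).length : Int) := by rw [show tw [x,y,z] (1:Int) = y from rfl] at hlen; exact hlen
        have hm : (n-1).toNat + 1 ≤ y.length := by omega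
        obtain ⟨A1, B1⟩ := ih (n-1) 1 0 2 x y z s cnt dep (by omega) (by omega) (by simp [GoodTriple]) hnd
          (by rw [show tw [x,y,z] (1:Int) = y from rfl]; omega)
        rw [tK10] at A1
        have hndP1 : ((x ++ y.drop (y.length - (n-1).toNat)) ++ (y.take (y.length - (n-1).toNat)) ++ (z)).Nodup := by
          have hp := transferK_perm 1 0 (by simp [GoodPair]) (n-1).toNat x y z
          rw [tK10] at hp
          simp only [List.flatten_cons, List.flatten_nil, List.append_nil] at hp
          rw [List.append_assoc]
          exact hp.nodup_iff.mpr hnd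
        have hneP1 : tw [x ++ y.drop (y.length - (n-1).toNat), y.take (y.length - (n-1).toNat), z] 1 ≠ [] := by
          rw [show tw [x ++ y.drop (y.length - (n-1).toNat), y.take (y.length - (n-1).toNat), z] (1:Int) = y.take (y.length - (n-1).toNat) from rfl]
          apply List.ne_nil_of_length_pos
          simp only [List.length_take]
          omega
        set ms1 := movesA f (n-1) 1 0 2 with hms1
        set r1 := ms1.foldl stepA3 ([x,y,z], s, cnt) with hr1
        obtain ⟨A2, B2⟩ := step_eq 1 2 (by simp [GoodPair]) (x ++ y.drop (y.length - (n-1).toNat)) (y.take (y.length - (n-1).toNat)) (z)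
          r1.2.1 r1.2.2 (dep ++ ms1) hneP1 hndP1
        rw [tK12] at A2 B2
        have hndP2 : ((x ++ y.drop (y.length - (n-1).toNat)) ++ ((y.take (y.length - (n-1).toNat)).take ((y.take (y.length - (n-1).toNat)).length - 1)) ++ (z ++ (y.take (y.length - (n-1).toNat)).drop ((y.take (y.length - (n-1).toNat)).length - 1))).Nodup := by
          have hp := transferK_perm 1 2 (by simp [GoodPair]) 1 (x ++ y.drop (y.length - (n-1).toNat)) (y.take (y.length - (n-1).toNat)) (z)
          rw [tK12] at hp
          simp only [List.flatten_cons, List.flatten_nil, List.append_nil] at hp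
          rw [List.append_assoc]
          exact hp.nodup_iff.mpr hndP1
        have hAd : (y.drop (y.length - (n-1).toNat)).length = (n-1).toNat := by simp only [List.length_drop]; omega
        have hlb : (x ++ y.drop (y.length - (n-1).toNat)).length - (n-1).toNat = x.length := by simp only [List.length_append, hAd]; omega
        obtain ⟨A3, B3⟩ := ih (n-1) 0 2 1 (x ++ y.drop (y.length - (n-1).toNat)) ((y.take (y.length - (n-1).toNat)).take ((y.take (y.length - (n-1).toNat)).length - 1)) (z ++ (y.take (y.length - (n-1).toNat)).drop ((y.take (y.length - (n-1).toNat)).length - 1))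
          (r1.2.1.insert (r1.2.2 + 1) [x ++ y.drop (y.length - (n-1).toNat), (y.take (y.length - (n-1).toNat)).take ((y.take (y.length - (n-1).toNat)).length - 1), z ++ (y.take (y.length - (n-1).toNat)).drop ((y.take (y.length - (n-1).toNat)).length - 1)]) (r1.2.2 + 1) ((dep ++ ms1) ++ [[1,2]])
          (by omega) (by omega) (by simp [GoodTriple]) hndP2
          (by rw [show tw [x ++ y.drop (y.length - (n-1).toNat), (y.take (y.length - (n-1).toNat)).take ((y.take (y.length - (n-1).toNat)).length - 1), z ++ (y.take (y.length - (n-1).toNat)).drop ((y.take (y.length - (n-1).toNat)).length - 1)] (0:Int) = x ++ y.drop (y.length - (n-1).toNat) from rfl]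
              have : (x ++ y.drop (y.length - (n-1).toNat)).length = x.length + (n-1).toNat := by rw [List.length_append, hAd]
              omega)
        rw [tK02] at A3
        have hEb : (x ++ y.drop (y.length - (n-1).toNat)).take ((x ++ y.drop (y.length - (n-1).toNat)).length - (n-1).toNat) = x := by rw [hlb, List.take_left]
        have hEbd : (x ++ y.drop (y.length - (n-1).toNat)).drop ((x ++ y.drop (y.length - (n-1).toNat)).length - (n-1).toNat) = y.drop (y.length - (n-1).toNat) := by rw [hlb, List.drop_left]
        have hEa : ((y.take (y.length - (n-1).toNat)).take ((y.take (y.length - (n-1).toNat)).length - 1)) = y.take (y.length - ((n-1).toNat + 1)) := by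
          rw [List.take_take]
          congr 1
          simp only [List.length_take]
          omega
        have hEc : (y.take (y.length - (n-1).toNat)).drop ((y.take (y.length - (n-1).toNat)).length - 1) ++ (y.drop (y.length - (n-1).toNat)) = y.drop (y.length - ((n-1).toNat + 1)) := by
          have h1 : (y.take (y.length - (n-1).toNat)).length = y.length - (n-1).toNat := by simp only [List.length_take]; omega
          rw [h1]
          have h2 := take_drop_chain y (y.length - (n-1).toNat) (by omega)
          rw [h2]
          congr 1
          try omega
        constructor
        · rw [hmv]
          simp only [List.foldl_append, List.foldl_cons, List.foldl_nil, ← hr1]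
          rw [show r1 = (r1.1, r1.2.1, r1.2.2) from rfl, A1, A2, A3, hnt]
          rw [tK12]
          rw [hEb, hEbd, hEa]
          rw [List.append_assoc, hEc]
        · rw [hmv]
          simp only [List.foldl_append, List.foldl_cons, List.foldl_nil, ← hr1]
          rw [show r1 = (r1.1, r1.2.1, r1.2.2) from rfl] at B1 ⊢
          rw [B1, A1, B2, A2, B3]
          simp [List.append_assoc]
      · -- case a=2, c=0, b=1
        have hlenA : n ≤ ((z).length : Int) := by rw [show tw [x,y,z] (2:Int) = z from rfl] at hlen; exact hlen
        have hm : (n-1).toNat + 1 ≤ z.length := by omega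
        obtain ⟨A1, B1⟩ := ih (n-1) 2 1 0 x y z s cnt dep (by omega) (by omega) (by simp [GoodTriple]) hnd
          (by rw [show tw [x,y,z] (2:Int) = z from rfl]; omega)
        rw [tK21] at A1
        have hndP1 : ((x) ++ (y ++ z.drop (z.length - (n-1).toNat)) ++ (z.take (z.length - (n-1).toNat))).Nodup := by
          have hp := transferK_perm 2 1 (by simp [GoodPair]) (n-1).toNat x y z
          rw [tK21] at hp
          simp only [List.flatten_cons, List.flatten_nil, List.append_nil] at hp
          rw [List.append_assoc]
          exact hp.nodup_iff.mpr hnd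
        have hneP1 : tw [x, y ++ z.drop (z.length - (n-1).toNat), z.take (z.length - (n-1).toNat)] 2 ≠ [] := by
          rw [show tw [x, y ++ z.drop (z.length - (n-1).toNat), z.take (z.length - (n-1).toNat)] (2:Int) = z.take (z.length - (n-1).toNat) from rfl]
          apply List.ne_nil_of_length_pos
          simp only [List.length_take]
          omega
        set ms1 := movesA f (n-1) 2 1 0 with hms1
        set r1 := ms1.foldl stepA3 ([x,y,z], s, cnt) with hr1
        obtain ⟨A2, B2⟩ := step_eq 2 0 (by simp [GoodPair]) (x) (y ++ z.drop (z.length - (n-1).toNat)) (z.take (z.length - (n-1).toNat))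
          r1.2.1 r1.2.2 (dep ++ ms1) hneP1 hndP1
        rw [tK20] at A2 B2
        have hndP2 : ((x ++ (z.take (z.length - (n-1).toNat)).drop ((z.take (z.length - (n-1).toNat)).length - 1)) ++ (y ++ z.drop (z.length - (n-1).toNat)) ++ ((z.take (z.length - (n-1).toNat)).take ((z.take (z.length - (n-1).toNat)).length - 1))).Nodup := by
          have hp := transferK_perm 2 0 (by simp [GoodPair]) 1 (x) (y ++ z.drop (z.length - (n-1).toNat)) (z.take (z.length - (n-1).toNat))
          rw [tK20] at hp
          simp only [List.flatten_cons, List.flatten_nil, List.append_nil] at hp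
          rw [List.append_assoc]
          exact hp.nodup_iff.mpr hndP1
        have hAd : (z.drop (z.length - (n-1).toNat)).length = (n-1).toNat := by simp only [List.length_drop]; omega
        have hlb : (y ++ z.drop (z.length - (n-1).toNat)).length - (n-1).toNat = y.length := by simp only [List.length_append, hAd]; omega
        obtain ⟨A3, B3⟩ := ih (n-1) 1 0 2 (x ++ (z.take (z.length - (n-1).toNat)).drop ((z.take (z.length - (n-1).toNat)).length - 1)) (y ++ z.drop (z.length - (n-1).toNat)) ((z.take (z.length - (n-1).toNat)).take ((z.take (z.length - (n-1).toNat)).length - 1))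
          (r1.2.1.insert (r1.2.2 + 1) [x ++ (z.take (z.length - (n-1).toNat)).drop ((z.take (z.length - (n-1).toNat)).length - 1), y ++ z.drop (z.length - (n-1).toNat), (z.take (z.length - (n-1).toNat)).take ((z.take (z.length - (n-1).toNat)).length - 1)]) (r1.2.2 + 1) ((dep ++ ms1) ++ [[2,0]])
          (by omega) (by omega) (by simp [GoodTriple]) hndP2
          (by rw [show tw [x ++ (z.take (z.length - (n-1).toNat)).drop ((z.take (z.length - (n-1).toNat)).length - 1), y ++ z.drop (z.length - (n-1).toNat), (z.take (z.length - (n-1).toNat)).take ((z.take (z.length - (n-1).toNat)).length - 1)] (1:Int) = y ++ z.drop (z.length - (n-1).toNat) from rfl]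
              have : (y ++ z.drop (z.length - (n-1).toNat)).length = y.length + (n-1).toNat := by rw [List.length_append, hAd]
              omega)
        rw [tK10] at A3
        have hEb : (y ++ z.drop (z.length - (n-1).toNat)).take ((y ++ z.drop (z.length - (n-1).toNat)).length - (n-1).toNat) = y := by rw [hlb, List.take_left]
        have hEbd : (y ++ z.drop (z.length - (n-1).toNat)).drop ((y ++ z.drop (z.length - (n-1).toNat)).length - (n-1).toNat) = z.drop (z.length - (n-1).toNat) := by rw [hlb, List.drop_left]
        have hEa : ((z.take (z.length - (n-1).toNat)).take ((z.take (z.length - (n-1).toNat)).length - 1)) = z.take (z.length - ((n-1).toNat + 1)) := by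
          rw [List.take_take]
          congr 1
          simp only [List.length_take]
          omega
        have hEc : (z.take (z.length - (n-1).toNat)).drop ((z.take (z.length - (n-1).toNat)).length - 1) ++ (z.drop (z.length - (n-1).toNat)) = z.drop (z.length - ((n-1).toNat + 1)) := by
          have h1 : (z.take (z.length - (n-1).toNat)).length = z.length - (n-1).toNat := by simp only [List.length_take]; omega
          rw [h1]
          have h2 := take_drop_chain z (z.length - (n-1).toNat) (by omega)
          rw [h2]
          congr 1
          try omega
        constructor
        · rw [hmv]
          simp only [List.foldl_append, List.foldl_cons, List.foldl_nil, ← hr1]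
          rw [show r1 = (r1.1, r1.2.1, r1.2.2) from rfl, A1, A2, A3, hnt]
          rw [tK20]
          rw [hEb, hEbd, hEa]
          rw [List.append_assoc, hEc]
        · rw [hmv]
          simp only [List.foldl_append, List.foldl_cons, List.foldl_nil, ← hr1]
          rw [show r1 = (r1.1, r1.2.1, r1.2.2) from rfl] at B1 ⊢
          rw [B1, A1, B2, A2, B3]
          simp [List.append_assoc]
      · -- case a=2, c=1, b=0
        have hlenA : n ≤ ((z).length : Int) := by rw [show tw [x,y,z] (2:Int) = z from rfl] at hlen; exact hlen
        have hm : (n-1).toNat + 1 ≤ z.length := by omega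
        obtain ⟨A1, B1⟩ := ih (n-1) 2 0 1 x y z s cnt dep (by omega) (by omega) (by simp [GoodTriple]) hnd
          (by rw [show tw [x,y,z] (2:Int) = z from rfl]; omega)
        rw [tK20] at A1
        have hndP1 : ((x ++ z.drop (z.length - (n-1).toNat)) ++ (y) ++ (z.take (z.length - (n-1).toNat))).Nodup := by
          have hp := transferK_perm 2 0 (by simp [GoodPair]) (n-1).toNat x y z
          rw [tK20] at hp
          simp only [List.flatten_cons, List.flatten_nil, List.append_nil] at hp
          rw [List.append_assoc]
          exact hp.nodup_iff.mpr hnd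
        have hneP1 : tw [x ++ z.drop (z.length - (n-1).toNat), y, z.take (z.length - (n-1).toNat)] 2 ≠ [] := by
          rw [show tw [x ++ z.drop (z.length - (n-1).toNat), y, z.take (z.length - (n-1).toNat)] (2:Int) = z.take (z.length - (n-1).toNat) from rfl]
          apply List.ne_nil_of_length_pos
          simp only [List.length_take]
          omega
        set ms1 := movesA f (n-1) 2 0 1 with hms1
        set r1 := ms1.foldl stepA3 ([x,y,z], s, cnt) with hr1
        obtain ⟨A2, B2⟩ := step_eq 2 1 (by simp [GoodPair]) (x ++ z.drop (z.length - (n-1).toNat)) (y) (z.take (z.length - (n-1).toNat))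
          r1.2.1 r1.2.2 (dep ++ ms1) hneP1 hndP1
        rw [tK21] at A2 B2
        have hndP2 : ((x ++ z.drop (z.length - (n-1).toNat)) ++ (y ++ (z.take (z.length - (n-1).toNat)).drop ((z.take (z.length - (n-1).toNat)).length - 1)) ++ ((z.take (z.length - (n-1).toNat)).take ((z.take (z.length - (n-1).toNat)).length - 1))).Nodup := by
          have hp := transferK_perm 2 1 (by simp [GoodPair]) 1 (x ++ z.drop (z.length - (n-1).toNat)) (y) (z.take (z.length - (n-1).toNat))
          rw [tK21] at hp
          simp only [List.flatten_cons, List.flatten_nil, List.append_nil] at hp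
          rw [List.append_assoc]
          exact hp.nodup_iff.mpr hndP1
        have hAd : (z.drop (z.length - (n-1).toNat)).length = (n-1).toNat := by simp only [List.length_drop]; omega
        have hlb : (x ++ z.drop (z.length - (n-1).toNat)).length - (n-1).toNat = x.length := by simp only [List.length_append, hAd]; omega
        obtain ⟨A3, B3⟩ := ih (n-1) 0 1 2 (x ++ z.drop (z.length - (n-1).toNat)) (y ++ (z.take (z.length - (n-1).toNat)).drop ((z.take (z.length - (n-1).toNat)).length - 1)) ((z.take (z.length - (n-1).toNat)).take ((z.take (z.length - (n-1).toNat)).length - 1))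
          (r1.2.1.insert (r1.2.2 + 1) [x ++ z.drop (z.length - (n-1).toNat), y ++ (z.take (z.length - (n-1).toNat)).drop ((z.take (z.length - (n-1).toNat)).length - 1), (z.take (z.length - (n-1).toNat)).take ((z.take (z.length - (n-1).toNat)).length - 1)]) (r1.2.2 + 1) ((dep ++ ms1) ++ [[2,1]])
          (by omega) (by omega) (by simp [GoodTriple]) hndP2
          (by rw [show tw [x ++ z.drop (z.length - (n-1).toNat), y ++ (z.take (z.length - (n-1).toNat)).drop ((z.take (z.length - (n-1).toNat)).length - 1), (z.take (z.length - (n-1).toNat)).take ((z.take (z.length - (n-1).toNat)).length - 1)] (0:Int) = x ++ z.drop (z.length - (n-1).toNat) from rfl]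
              have : (x ++ z.drop (z.length - (n-1).toNat)).length = x.length + (n-1).toNat := by rw [List.length_append, hAd]
              omega)
        rw [tK01] at A3
        have hEb : (x ++ z.drop (z.length - (n-1).toNat)).take ((x ++ z.drop (z.length - (n-1).toNat)).length - (n-1).toNat) = x := by rw [hlb, List.take_left]
        have hEbd : (x ++ z.drop (z.length - (n-1).toNat)).drop ((x ++ z.drop (z.length - (n-1).toNat)).length - (n-1).toNat) = z.drop (z.length - (n-1).toNat) := by rw [hlb, List.drop_left]
        have hEa : ((z.take (z.length - (n-1).toNat)).take ((z.take (z.length - (n-1).toNat)).length - 1)) = z.take (z.length - ((n-1).toNat + 1)) := by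
          rw [List.take_take]
          congr 1
          simp only [List.length_take]
          omega
        have hEc : (z.take (z.length - (n-1).toNat)).drop ((z.take (z.length - (n-1).toNat)).length - 1) ++ (z.drop (z.length - (n-1).toNat)) = z.drop (z.length - ((n-1).toNat + 1)) := by
          have h1 : (z.take (z.length - (n-1).toNat)).length = z.length - (n-1).toNat := by simp only [List.length_take]; omega
          rw [h1]
          have h2 := take_drop_chain z (z.length - (n-1).toNat) (by omega)
          rw [h2]
          congr 1
          try omega
        constructor
        · rw [hmv]
          simp only [List.foldl_append, List.foldl_cons, List.foldl_nil, ← hr1]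
          rw [show r1 = (r1.1, r1.2.1, r1.2.2) from rfl, A1, A2, A3, hnt]
          rw [tK21]
          rw [hEb, hEbd, hEa]
          rw [List.append_assoc, hEc]
        · rw [hmv]
          simp only [List.foldl_append, List.foldl_cons, List.foldl_nil, ← hr1]
          rw [show r1 = (r1.1, r1.2.1, r1.2.2) from rfl] at B1 ⊢
          rw [B1, A1, B2, A2, B3]
          simp [List.append_assoc]

lemma initLoop_eq_aux (k : Nat) : ∀ (n : Int) (liste : List Int), n.toNat = k →
    initLoop liste n = liste ++ PySem.List.pyRange n 0 (-1) := by
  induction k with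
  | zero => intro n liste h; rw [initLoop]; rw [dif_neg (by omega), PySem.List.pyRange_neg_one_eq_nil (by omega)]; simp
  | succ k ih =>
    intro n liste h
    rw [initLoop, dif_pos (by omega), ih (n-1) _ (by omega),
      show PySem.List.pyRange n 0 (-1) = n :: PySem.List.pyRange (n-1) 0 (-1) from
        PySem.List.pyRange_neg_one_cons (by omega)]
    simp

lemma initLoop_eq (n : Int) : initLoop [] n = PySem.List.pyRange n 0 (-1) := by
  simpa using initLoop_eq_aux n.toNat n [] rfl

lemma cd_length (n : Int) : (PySem.List.pyRange n 0 (-1)).length = n.toNat := by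
  simp [PySem.List.length_pyRange_neg_one]

lemma cd_nodup (n : Int) : (PySem.List.pyRange n 0 (-1)).Nodup := by
  rw [PySem.List.pyRange_neg_one_eq_reverse]
  simp [PySem.List.nodup_pyRange_one]

lemma movesA_length (fuel : Nat) : ∀ (n a c b : Int), 1 ≤ n → n ≤ (fuel : Int) →
    (movesA fuel n a c b).length = 2 ^ n.toNat - 1 := by
  induction fuel with
  | zero => intro n a c b h1 h2; exfalso; omega
  | succ f ih =>
    intro n a c b h1 h2
    by_cases hn : n = 1
    · subst hn; simp [movesA]
    · have h2' : 1 ≤ n - 1 := by omega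
      simp only [movesA, show (n == 1) = false by simp [hn]]
      simp only [Bool.false_eq_true, if_false, List.length_append, List.length_cons,
        List.length_nil, ih (n-1) _ _ _ h2' (by omega)]
      have ht : n.toNat = (n-1).toNat + 1 := by omega
      rw [ht, pow_succ]
      have hp : 1 ≤ 2 ^ (n-1).toNat := Nat.one_le_two_pow
      omega

lemma runFrames_cons (K : Nat) : ∀ (n a c b : Int), n.toNat ≤ K → 1 ≤ n →
    ∀ (rest : List (Int × Int × Int × Int)) (st : HState),
    runFrames ((n, a, c, b) :: rest) st
      = runFrames rest ((movesA n.toNat n a c b).foldl stepB st) := by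
  induction K with
  | zero => intro n a c b hK h1; exfalso; omega
  | succ K ihK =>
    intro n a c b hK h1 rest st
    by_cases hn : n = 1
    · subst hn
      rw [runFrames, if_neg (by omega)]
      simp [movesA, stepB]
      rfl
    · have h2 : 2 ≤ n := by omega
      have hnt : n.toNat = (n-1).toNat + 1 := by omega
      rw [runFrames, if_pos (by omega)]
      rw [ihK (n-1) a b c (by omega) (by omega)]
      rw [ihK 1 a c b (by omega) (by omega)]
      rw [ihK (n-1) b c a (by omega) (by omega)]
      rw [hnt]
      simp only [movesA, show ((n:Int) == 1) = false by simp [hn], Bool.false_eq_true, if_false,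
        List.foldl_append]
      simp [movesA, stepB]
lemma pyGetD_append_length (pre : List (List Int)) (m : List Int) (tl : List (List Int)) :
    PySem.List.pyGetD (pre ++ m :: tl) (pre.length : Int) [] = m := by
  simp [PySem.List.pyGetD_natCast, List.getD_eq_getElem?_getD]

lemma replay_eq (ms : List (List Int)) : ∀ (pre : List (List Int))
    (p : List (List Int)) (s : PySem.Dict Int (List (List Int))),
    (PySem.List.pyRange (pre.length : Int) ((pre.length : Int) + ms.length) 1).foldl
        (stepLit (pre ++ ms)) (p, s)
      = ((ms.foldl stepA3 (p, s, (pre.length : Int))).1,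
         (ms.foldl stepA3 (p, s, (pre.length : Int))).2.1) := by
  induction ms with
  | nil => intro pre p s; simp [PySem.List.pyRange_one_eq_nil]
  | cons m tl ih =>
    intro pre p s
    rw [PySem.List.pyRange_one_cons (by simp only [List.length_cons]; push_cast; omega)]
    simp only [List.foldl_cons]
    have hstep : stepLit (pre ++ m :: tl) (p, s) (pre.length : Int)
        = ((stepA3 (p, s, (pre.length : Int)) m).1, (stepA3 (p, s, (pre.length : Int)) m).2.1) := by
      simp only [stepLit, stepA3, pyGetD_append_length]
    rw [hstep]
    have hpre : ((pre ++ [m]).length : Int) = (pre.length : Int) + 1 := by simp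
    have := ih (pre ++ [m]) (stepA3 (p, s, (pre.length : Int)) m).1
        (stepA3 (p, s, (pre.length : Int)) m).2.1
    rw [hpre] at this
    simp only [List.append_assoc, List.singleton_append] at this
    have hb : ((pre.length : Int) + ((m :: tl).length : Int)) = ((pre.length : Int) + 1) + (tl.length : Int) := by
      simp only [List.length_cons]; push_cast; ring
    rw [hb]
    exact this


-- ===== VERDICT (by name: the statement is the Claim_ definition above) =====
theorem solution_spec : Claim_equal_solution := by
  intro n tour0 tour2 tour1 _ hpre
  unfold Pre_solution at hpre
  unfold Spec_solution
  simp only [solution, solution_alt]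
  have hfuel : n ≤ (n.toNat : Int) := by omega
  have hinit : initLoop [] n = PySem.List.pyRange n 0 (-1) := initLoop_eq n
  set cd := PySem.List.pyRange n 0 (-1) with hcd
  have hlen : (movesA n.toNat n 0 2 1).length = 2 ^ n.toNat - 1 :=
    movesA_length _ _ _ _ _ hpre hfuel
  have h1 : 1 ≤ 2 ^ n.toNat := Nat.one_le_two_pow
  have hbound : ((2:Int) ^ n.toNat - 1) = ((0:Int) + ((movesA n.toNat n 0 2 1).length : Int)) := by
    rw [hlen, Nat.cast_sub h1]
    push_cast
    ring
  have hrep := replay_eq (movesA n.toNat n 0 2 1) [] [cd, [], []]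
      (PySem.Dict.empty.insert 0 [cd, [], []])
  simp only [List.nil_append, List.length_nil, Nat.cast_zero] at hrep
  have hnd : (cd ++ [] ++ []).Nodup := by simp [hcd, cd_nodup]
  obtain ⟨hm1, hm2⟩ := main n.toNat n 0 2 1 cd [] []
      (PySem.Dict.empty.insert 0 [cd, [], []]) 0 [] hpre hfuel (by simp [GoodTriple]) hnd
      (by rw [show tw [cd, [], []] (0:Int) = cd from rfl, hcd, cd_length]; omega)
  have hB := runFrames_cons n.toNat n 0 2 1 le_rfl hpre [] ([cd, [], []], [], PySem.Dict.empty.insert 0 [cd, [], []], 0)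
  rw [show ∀ st : HState, runFrames [] st = st from fun _ => by rw [runFrames]] at hB
  rw [show init3 n = [cd, [], []] from by rw [init3, hinit], show initB n = [cd, [], []] from rfl]
  rw [hbound, hrep, hB, hm2]
  simp
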